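-- pv_equiv track=rewrite | github.com/AlchemistYT/LLM4RSR | apo4rec/util.py | init_prompts
-- ===== SOURCE A (Python) =====
-- def init_prompts(profiles, instructions, restrictions, examples, config):
--     item_type = config['item_type']
--     prompts = []
--     for profile in profiles:
--         for instruction in instructions:
--             for example in examples:
--                 for restriction in restrictions:
--                     prompt = {
--                         'profile': profile.replace('$item_type$', item_type),
--                         'instruction': instruction.replace('$item_type$', item_type),
--                         'restriction': restriction.replace('$item_type$', item_type),
--                         'example': example.replace('$item_type$', item_type),
--                     }
--                     prompts.append(prompt)
--     return prompts
-- ===== SOURCE B (Python) =====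
-- def init_prompts(profiles, instructions, restrictions, examples, config):
--     item_type = config['item_type']
--
--     def product(lists):
--         if not lists:
--             return [[]]
--         head, rest = lists[0], lists[1:]
--         tails = product(rest)
--         return [[x] + tail for x in head for tail in tails]
--
--     sub = lambda s: s.replace('$item_type$', item_type)
--     return [{'profile': sub(p), 'instruction': sub(i),
--              'restriction': sub(r), 'example': sub(e)}
--             for p, i, e, r in product([profiles, instructions, examples, restrictions])]
-- ===== Notes on version B (the rewrite author's own statement) =====
-- stated objective: alternative
-- what changed: B replaces the four hand-written nested loops by a generic recursive n-ary Cartesian-product helper over a list of component lists, then maps each 4-combination to its substituted prompt dict in one comprehension.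
import Mathlib
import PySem

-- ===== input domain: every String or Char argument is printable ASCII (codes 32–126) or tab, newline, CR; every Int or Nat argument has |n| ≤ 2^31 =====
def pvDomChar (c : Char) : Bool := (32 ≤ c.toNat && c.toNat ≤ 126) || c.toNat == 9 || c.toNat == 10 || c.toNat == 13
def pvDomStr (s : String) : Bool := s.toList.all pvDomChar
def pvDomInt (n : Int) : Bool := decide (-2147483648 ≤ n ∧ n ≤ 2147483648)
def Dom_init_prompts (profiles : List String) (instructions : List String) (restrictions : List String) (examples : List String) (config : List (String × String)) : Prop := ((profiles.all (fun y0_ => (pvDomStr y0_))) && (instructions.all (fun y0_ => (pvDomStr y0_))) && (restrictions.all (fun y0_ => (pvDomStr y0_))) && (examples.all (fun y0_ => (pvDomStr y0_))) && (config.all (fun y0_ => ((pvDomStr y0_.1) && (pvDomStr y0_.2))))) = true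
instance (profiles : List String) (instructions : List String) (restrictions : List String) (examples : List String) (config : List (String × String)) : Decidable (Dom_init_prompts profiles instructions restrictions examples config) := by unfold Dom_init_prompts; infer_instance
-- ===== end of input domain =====

-- B builds the combinations with a generic recursive n-ary Cartesian-product helper and maps
-- each 4-combination to its substituted prompt dict (alternative decomposition, same cost).


-- ===== PORT A =====
-- config['item_type'] : first-match lookup in the association list; A raises KeyError when
-- the key is absent, which Pre_ excludes (the none branch returns [] and is never claimed).
def init_prompts (profiles : List String) (instructions : List String) (restrictions : List String) (examples : List String) (config : List (String × String)) : List (List (String × String)) :=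
  match config.find? (fun kv => kv.1 == "item_type") with
  | none => []
  | some kv =>
    let item_type := kv.2
    profiles.foldl (fun acc prof =>
      instructions.foldl (fun acc instr =>
        examples.foldl (fun acc ex =>
          restrictions.foldl (fun acc restr =>
            acc ++ [[("profile", PySem.Str.replace prof "$item_type$" item_type),
                     ("instruction", PySem.Str.replace instr "$item_type$" item_type),
                     ("restriction", PySem.Str.replace restr "$item_type$" item_type),
                     ("example", PySem.Str.replace ex "$item_type$" item_type)]]) acc) acc) acc) []

-- ===== PORT B =====
-- B's recursive n-ary Cartesian product over a list of component lists.
def pvProduct : List (List String) → List (List String)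
  | [] => [[]]
  | head :: rest => head.flatMap (fun x => (pvProduct rest).map (fun tail => x :: tail))

def init_prompts_alt (profiles : List String) (instructions : List String) (restrictions : List String) (examples : List String) (config : List (String × String)) : List (List (String × String)) :=
  match config.find? (fun kv => kv.1 == "item_type") with
  | none => []
  | some kv =>
    let item_type := kv.2
    let sub := fun s => PySem.Str.replace s "$item_type$" item_type
    -- the comprehension unpacks each combination as p, i, e, r; every combination has length 4,
    -- so the wildcard branch (Python's ValueError on unpacking) is unreachable.
    (pvProduct [profiles, instructions, examples, restrictions]).filterMap (fun combo =>
      match combo with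
      | [p, i, e, r] => some [("profile", sub p), ("instruction", sub i),
                              ("restriction", sub r), ("example", sub e)]
      | _ => none)

-- ===== PRECONDITION & SPEC =====
-- Pre_ excludes configs without an 'item_type' key, on which the Python A raises KeyError.
def Pre_init_prompts (profiles : List String) (instructions : List String) (restrictions : List String) (examples : List String) (config : List (String × String)) : Prop :=
  (config.find? (fun kv => kv.1 == "item_type")).isSome = true
instance (profiles : List String) (instructions : List String) (restrictions : List String) (examples : List String) (config : List (String × String)) : Decidable (Pre_init_prompts profiles instructions restrictions examples config) := by unfold Pre_init_prompts; infer_instance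

def pvWitness_init_prompts : List String × List String × List String × List String × (List (String × String)) :=
  (["a $item_type$ fan"], ["recommend"], ["short"], ["e.g."], [("item_type", "movie")])

def Spec_init_prompts (profiles : List String) (instructions : List String) (restrictions : List String) (examples : List String) (config : List (String × String)) (out : List (List (String × String))) : Prop := out = init_prompts_alt profiles instructions restrictions examples config
instance (profiles : List String) (instructions : List String) (restrictions : List String) (examples : List String) (config : List (String × String)) (out : List (List (String × String))) : Decidable (Spec_init_prompts profiles instructions restrictions examples config out) := by unfold Spec_init_prompts; infer_instance

-- ===== CLAIM (what is proved, stated in full; the proofs are below) =====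
def Claim_equal_init_prompts : Prop := ∀ (profiles : List String) (instructions : List String) (restrictions : List String) (examples : List String) (config : List (String × String)), Dom_init_prompts profiles instructions restrictions examples config → Pre_init_prompts profiles instructions restrictions examples config → Spec_init_prompts profiles instructions restrictions examples config (init_prompts profiles instructions restrictions examples config)

-- ===== LEMMAS AND PROOFS =====
theorem pv_flatMap_sing {α β : Type} (f : α → β) (l : List α) :
    l.flatMap (fun x => [f x]) = l.map f := by
  induction l with
  | nil => rfl
  | cons h t ih => simp [List.flatMap_cons, ih]

-- ===== VERDICT (by name: the statement is the Claim_ definition above) =====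
theorem init_prompts_spec : Claim_equal_init_prompts := by
  intro profiles instructions restrictions examples config _ _
  unfold Spec_init_prompts init_prompts init_prompts_alt
  cases config.find? (fun kv => kv.1 == "item_type") with
  | none => rfl
  | some kv =>
    simp only [pvProduct, PySem.List.foldl_append_singleton_eq_map,
      PySem.List.foldl_append_eq_flatMap, List.nil_append]
    simp [List.filterMap_flatMap, List.map_flatMap]
    refine congrArg (fun f => List.flatMap f profiles) (funext fun p => ?_)
    refine congrArg (fun f => List.flatMap f instructions) (funext fun i => ?_)
    refine congrArg (fun f => List.flatMap f examples) (funext fun e => ?_)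
    exact (pv_flatMap_sing _ restrictions).symm
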